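-- pv_equiv track=rewrite | github.com/Evacuation-Sim/Matrix_Translation_Model | MatrixTranslationModel.py | find_tree
-- ===== SOURCE A (Python) =====
-- def find_tree(trees, node):
--     tree_name = -1
--     keys = trees.keys()
--     for key in keys:
--         tree = trees[key]
--         if node in tree:
--             tree_name = key
--     return tree_name
-- ===== SOURCE B (Python) =====
-- def find_tree(trees, node):
--     for key in reversed(list(trees.keys())):
--         if node in trees[key]:
--             return key
--     return -1
-- ===== Notes on version B (the rewrite author's own statement) =====
-- stated objective: simpler
-- what changed: Scans the keys in reverse order and returns the first key whose tree contains the node (early exit), instead of scanning forward and overwriting a last-hit accumulator.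
import Mathlib
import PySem

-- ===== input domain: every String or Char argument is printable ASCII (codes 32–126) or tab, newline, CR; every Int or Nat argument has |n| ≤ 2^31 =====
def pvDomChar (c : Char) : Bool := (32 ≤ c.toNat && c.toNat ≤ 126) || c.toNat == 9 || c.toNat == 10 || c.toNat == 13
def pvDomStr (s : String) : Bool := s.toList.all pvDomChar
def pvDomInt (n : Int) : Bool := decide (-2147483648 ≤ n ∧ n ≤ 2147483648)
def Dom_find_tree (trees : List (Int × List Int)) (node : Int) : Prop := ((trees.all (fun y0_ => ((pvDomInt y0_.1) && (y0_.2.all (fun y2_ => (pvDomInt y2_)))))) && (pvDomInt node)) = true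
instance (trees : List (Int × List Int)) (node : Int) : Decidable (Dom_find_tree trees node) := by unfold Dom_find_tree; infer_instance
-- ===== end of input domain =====

-- B replaces A's forward scan with a last-hit accumulator by a reverse scan with early exit (simpler decomposition; same cost).


-- ===== PORT A =====
-- tree_name = -1; for key in trees.keys(): tree = trees[key]; if node in tree: tree_name = key; return tree_name
def find_tree (trees : List (Int × List Int)) (node : Int) : Int :=
  let d := PySem.Dict.mk trees
  d.keys.foldl
    (fun tree_name key =>
      let tree := d.getD key []
      if tree.contains node then key else tree_name)
    (-1)

-- ===== PORT B =====
-- for key in reversed(list(trees.keys())): if node in trees[key]: return key / return -1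
def pvScanRev (p : Int → Bool) : List Int → Int
  | [] => -1
  | key :: rest => if p key then key else pvScanRev p rest

def find_tree_alt (trees : List (Int × List Int)) (node : Int) : Int :=
  let d := PySem.Dict.mk trees
  pvScanRev (fun key => (d.getD key []).contains node) d.keys.reverse

-- ===== PRECONDITION & SPEC =====
def Spec_find_tree (trees : List (Int × List Int)) (node : Int) (out : Int) : Prop := out = find_tree_alt trees node
instance (trees : List (Int × List Int)) (node : Int) (out : Int) : Decidable (Spec_find_tree trees node out) := by unfold Spec_find_tree; infer_instance

-- ===== CLAIM (what is proved, stated in full; the proofs are below) =====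
def Claim_equal_find_tree : Prop := ∀ (trees : List (Int × List Int)) (node : Int), Dom_find_tree trees node → Spec_find_tree trees node (find_tree trees node)

-- ===== LEMMAS AND PROOFS =====

theorem pvScanRev_append_singleton (p : Int → Bool) (l : List Int) (k : Int) :
    pvScanRev p (l ++ [k]) =
      if l.any p then pvScanRev p l else (if p k then k else -1) := by
  induction l with
  | nil => simp [pvScanRev]
  | cons x xs ih =>
      by_cases hx : p x <;> simp [pvScanRev, hx, ih]

theorem foldl_lastHit_eq_scanRev (p : Int → Bool) (ks : List Int) (a : Int) :
    ks.foldl (fun acc key => if p key then key else acc) a =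
      if ks.any p then pvScanRev p ks.reverse else a := by
  induction ks generalizing a with
  | nil => simp
  | cons k ks ih =>
      simp only [List.foldl_cons, List.reverse_cons, List.any_cons]
      rw [ih, pvScanRev_append_singleton]
      by_cases hk : p k <;> by_cases hks : ks.any p <;>
        simp [hk, hks, List.any_reverse]

theorem scanRev_of_not_any (p : Int → Bool) (l : List Int) (h : l.any p = false) :
    pvScanRev p l = -1 := by
  induction l with
  | nil => rfl
  | cons x xs ih =>
      simp only [List.any_cons, Bool.or_eq_false_iff] at h
      simp [pvScanRev, h.1, ih h.2]

-- ===== VERDICT (by name: the statement is the Claim_ definition above) =====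
theorem find_tree_spec : Claim_equal_find_tree := by
  intro trees node _
  unfold Spec_find_tree find_tree find_tree_alt
  rw [foldl_lastHit_eq_scanRev]
  by_cases h : ((PySem.Dict.mk trees).keys).any
      (fun key => ((PySem.Dict.mk trees).getD key []).contains node)
  · rw [if_pos h]
  · simp only [Bool.not_eq_true] at h
    rw [if_neg (by rw [h]; exact Bool.false_ne_true),
      scanRev_of_not_any _ _ (by rw [List.any_reverse]; exact h)]
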